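-- pv_equiv track=rewrite | github.com/oluobiri/nba-hate-tracker | pipeline/aggregation.py | extract_team_from_flair
-- ===== SOURCE A (Python) =====
-- def extract_team_from_flair(
--     flair_text: str | None,
--     alias_to_team: dict[str, str],
-- ) -> str | None:
--     """
--     Extract team name from Reddit flair text.
--
--     Lowercases the flair and checks each team alias as a substring,
--     trying longest aliases first to avoid collisions (e.g., "hornets"
--     before "nets").
--
--     Args:
--         flair_text: Raw author flair text from Reddit.
--         alias_to_team: Mapping of lowercase aliases to canonical team names.
--
--     Returns:
--         Canonical team name, or None if no match found.
--     """
--     if not flair_text: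
--         return None
--
--     flair_lower = flair_text.lower()
--     # Sort aliases longest-first to prevent substring collisions
--     # (e.g., "hornets" must match before "nets")
--     for alias in sorted(alias_to_team, key=len, reverse=True):
--         if alias in flair_lower:
--             return alias_to_team[alias]
--
--     return None
-- ===== SOURCE B (Python) =====
-- def extract_team_from_flair(
--     flair_text: str | None,
--     alias_to_team: dict[str, str],
-- ) -> str | None:
--     """Single pass over the dict: keep the longest matching alias (first-inserted wins ties)."""
--     if not flair_text:
--         return None
--
--     flair_lower = flair_text.lower()
--     best_len = -1
--     best_team = None
--     for alias, team in alias_to_team.items():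
--         if len(alias) > best_len and alias in flair_lower:
--             best_len = len(alias)
--             best_team = team
--     return best_team
-- ===== Notes on version B (the rewrite author's own statement) =====
-- stated objective: simpler
-- what changed: Replaces A's per-call length-descending sort followed by a first-match scan with a single pass over the dict that keeps the longest matching alias, using strict '>' so the first-inserted alias wins length ties exactly like the stable sort's first match.
import Mathlib
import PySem

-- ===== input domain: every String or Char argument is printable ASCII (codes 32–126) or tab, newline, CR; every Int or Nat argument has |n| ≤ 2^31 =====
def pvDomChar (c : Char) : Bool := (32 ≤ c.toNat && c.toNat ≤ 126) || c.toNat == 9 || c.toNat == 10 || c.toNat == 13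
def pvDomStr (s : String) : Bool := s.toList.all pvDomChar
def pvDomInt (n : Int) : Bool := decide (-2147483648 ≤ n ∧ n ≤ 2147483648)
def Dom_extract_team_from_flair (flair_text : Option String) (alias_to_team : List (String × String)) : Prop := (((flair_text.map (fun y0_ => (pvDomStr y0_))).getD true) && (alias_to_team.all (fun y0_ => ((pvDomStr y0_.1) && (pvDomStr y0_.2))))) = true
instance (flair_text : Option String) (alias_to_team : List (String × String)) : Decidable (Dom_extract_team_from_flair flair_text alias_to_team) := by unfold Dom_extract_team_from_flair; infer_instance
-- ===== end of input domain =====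

-- B replaces A's sort-then-scan by a single pass over the dict keeping the longest matching
-- alias (strict '>' so the first-inserted alias wins length ties): simpler, no per-call sort.

-- ===== PORT A =====
-- the 'for alias in sorted(...): if alias in flair_lower: return alias_to_team[alias]' loop
def pvAGo (fl : String) (d : PySem.Dict String String) : List String → Option String
  | [] => none
  | a :: rest => if PySem.Str.isIn a fl then d.get? a else pvAGo fl d rest

def extract_team_from_flair (flair_text : Option String) (alias_to_team : List (String × String)) : Option String :=
  match flair_text with
  | none => none
  | some s =>
    if s = "" then none
    else
      let flair_lower := PySem.Str.lower s
      let d := PySem.Dict.ofList alias_to_team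
      pvAGo flair_lower d (PySem.List.sorted d.keys PySem.Str.len true)

-- ===== PORT B =====
-- the body of B's 'for alias, team in alias_to_team.items(): ...' loop
def pvBStep (fl : String) (st : Int × Option String) (p : String × String) : Int × Option String :=
  if PySem.Str.len p.1 > st.1 ∧ PySem.Str.isIn p.1 fl = true then (PySem.Str.len p.1, some p.2) else st

def extract_team_from_flair_alt (flair_text : Option String) (alias_to_team : List (String × String)) : Option String :=
  match flair_text with
  | none => none
  | some s =>
    if s = "" then none
    else
      let flair_lower := PySem.Str.lower s
      let d := PySem.Dict.ofList alias_to_team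
      (d.items.foldl (pvBStep flair_lower) ((-1 : Int), (none : Option String))).2

-- ===== PRECONDITION & SPEC =====
def Spec_extract_team_from_flair (flair_text : Option String) (alias_to_team : List (String × String)) (out : Option String) : Prop := out = extract_team_from_flair_alt flair_text alias_to_team
instance (flair_text : Option String) (alias_to_team : List (String × String)) (out : Option String) : Decidable (Spec_extract_team_from_flair flair_text alias_to_team out) := by unfold Spec_extract_team_from_flair; infer_instance

-- ===== CLAIM (what is proved, stated in full; the proofs are below) =====
def Claim_equal_extract_team_from_flair : Prop := ∀ (flair_text : Option String) (alias_to_team : List (String × String)), Dom_extract_team_from_flair flair_text alias_to_team → Spec_extract_team_from_flair flair_text alias_to_team (extract_team_from_flair flair_text alias_to_team)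

-- ===== LEMMAS AND PROOFS =====

-- B's fold state as a function of "best pair so far"
def pvEnc (key : String × String → Int) : Option (String × String) → Int × Option String
  | none => (-1, none)
  | some p => (key p, some p.2)

-- B's step with the length key and the match test abstracted (pvBStep fl is an instance, by rfl)
def pvGStep (key : String × String → Int) (m : String × String → Bool)
    (st : Int × Option String) (p : String × String) : Int × Option String :=
  if key p > st.1 ∧ m p = true then (key p, some p.2) else st

theorem pvBStep_eq (fl : String) :
    pvBStep fl = pvGStep (fun p => PySem.Str.len p.1) (fun p => PySem.Str.isIn p.1 fl) := rfl

-- A's loop is find?-then-lookup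
theorem pvAGo_eq_find? (fl : String) (d : PySem.Dict String String) (s : List String) :
    pvAGo fl d s = (s.find? (fun a => PySem.Str.isIn a fl)).bind d.get? := by
  induction s with
  | nil => rfl
  | cons a rest ih =>
    by_cases h : PySem.Str.isIn a fl = true
    · rw [pvAGo, if_pos h, List.find?_cons_of_pos (p := fun a => PySem.Str.isIn a fl) h]; rfl
    · rw [pvAGo, if_neg h, List.find?_cons_of_neg (p := fun a => PySem.Str.isIn a fl) h, ih]

-- projecting an insertBy whose comparison factors through f commutes with map f
theorem pv_map_insertBy {α β : Type} (f : α → β) (key : β → Int) (x : α) (s : List α) :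
    (PySem.List.insertBy (fun a b => decide (key (f b) < key (f a))) x s).map f
      = PySem.List.insertBy (fun a b => decide (key b < key a)) (f x) (s.map f) := by
  induction s with
  | nil => rfl
  | cons y ys ih =>
    simp only [PySem.List.insertBy, List.map]
    by_cases h : key (f y) < key (f x)
    · rw [if_pos (by simpa using h), if_pos (by simpa using h)]; rfl
    · rw [if_neg (by simpa using h), if_neg (by simpa using h), List.map, ih]

-- sorting by (key ∘ f) then projecting = sorting the projections by key
theorem pv_map_sorted {α β : Type} (f : α → β) (key : β → Int) (l : List α) :
    PySem.List.sorted (l.map f) key true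
      = (PySem.List.sorted l (fun a => key (f a)) true).map f := by
  rw [PySem.List.sorted_rev_eq_foldl_insertBy, PySem.List.sorted_rev_eq_foldl_insertBy]
  induction l using List.reverseRecOn with
  | nil => rfl
  | append_singleton l x ih =>
    simp only [List.map_append, List.map_cons, List.map_nil, List.foldl_append, List.foldl_cons,
      List.foldl_nil, ih, pv_map_insertBy]

-- find? through an insertion into a key-descending list
theorem pv_find?_insertBy {α : Type} (m : α → Bool) (key : α → Int) (x : α) (s : List α)
    (hs : s.Pairwise (fun a b => key b ≤ key a)) :
    (PySem.List.insertBy (fun a b => decide (key b < key a)) x s).find? m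
      = match s.find? m with
        | none => if m x then some x else none
        | some p => if key p < key x ∧ m x = true then some x else some p := by
  induction s with
  | nil =>
    cases hmx : m x
    · simp [PySem.List.insertBy, List.find?, hmx]
    · simp [PySem.List.insertBy, List.find?, hmx]
  | cons y ys ih =>
    rcases List.pairwise_cons.mp hs with ⟨hy, hys⟩
    simp only [PySem.List.insertBy]
    by_cases hlt : key y < key x
    · rw [if_pos (by simpa using hlt)]
      cases hmx : m x
      · rw [List.find?_cons_of_neg (by simp [hmx])]
        cases hf : (y :: ys).find? m <;> simp
      · rw [List.find?_cons_of_pos hmx]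
        cases hf : (y :: ys).find? m with
        | none => simp
        | some p =>
          have hple : key p ≤ key y := by
            rcases List.mem_cons.mp (List.mem_of_find?_eq_some hf) with rfl | hp
            · exact le_refl _
            · exact hy p hp
          simp [lt_of_le_of_lt hple hlt]
    · rw [if_neg (by simpa using hlt)]
      cases hmy : m y
      · rw [List.find?_cons_of_neg (by simp [hmy]), List.find?_cons_of_neg (by simp [hmy]), ih hys]
      · rw [List.find?_cons_of_pos hmy, List.find?_cons_of_pos hmy]
        have : ¬ (key y < key x ∧ m x = true) := fun h => hlt h.1
        simp [this]

-- the core: B's fold over l is the first length-maximal matcher of sorted(l, key, reverse=True)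
theorem pv_foldl_eq_enc (key : String × String → Int) (m : String × String → Bool)
    (hnn : ∀ p, 0 ≤ key p) (l : List (String × String)) :
    l.foldl (pvGStep key m) ((-1 : Int), (none : Option String))
      = pvEnc key ((PySem.List.sorted l key true).find? m) := by
  induction l using List.reverseRecOn with
  | nil => rfl
  | append_singleton l x ih =>
    rw [List.foldl_append, List.foldl_cons, List.foldl_nil, ih]
    have hrw : PySem.List.sorted (l ++ [x]) key true
        = PySem.List.insertBy (fun a b => decide (key b < key a)) x (PySem.List.sorted l key true) := by
      rw [PySem.List.sorted_rev_eq_foldl_insertBy, PySem.List.sorted_rev_eq_foldl_insertBy,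
        List.foldl_append, List.foldl_cons, List.foldl_nil]
    rw [hrw, pv_find?_insertBy m key x _ (PySem.List.sorted_pairwise_rev l key)]
    cases hf : (PySem.List.sorted l key true).find? m with
    | none =>
      cases hmx : m x
      · simp [pvEnc, pvGStep, hmx]
      · have h1 : (-1 : Int) < key x := lt_of_lt_of_le (by norm_num) (hnn x)
        simp [pvEnc, pvGStep, hmx, h1]
    | some p =>
      cases hmx : m x
      · simp [pvEnc, pvGStep, hmx]
      · by_cases hc : key p < key x
        · simp [pvEnc, pvGStep, hmx, hc]
        · simp [pvEnc, pvGStep, hmx, hc]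

theorem pv_main (fl : String) (aps : List (String × String)) :
    pvAGo fl (PySem.Dict.ofList aps) (PySem.List.sorted (PySem.Dict.ofList aps).keys PySem.Str.len true)
      = ((PySem.Dict.ofList aps).items.foldl (pvBStep fl) ((-1 : Int), (none : Option String))).2 := by
  set d := PySem.Dict.ofList aps with hd
  have hkeys : d.keys = d.items.map Prod.fst := rfl
  rw [pvAGo_eq_find?, hkeys, pv_map_sorted Prod.fst PySem.Str.len d.items, List.find?_map,
    pvBStep_eq, pv_foldl_eq_enc (fun p => PySem.Str.len p.1) (fun p => PySem.Str.isIn p.1 fl)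
      (fun p => by simp [PySem.Str.len_eq]) d.items]
  have hcomp : ((fun a => PySem.Str.isIn a fl) ∘ Prod.fst)
      = (fun p : String × String => PySem.Str.isIn p.1 fl) := rfl
  rw [hcomp]
  cases hf : (PySem.List.sorted d.items (fun p => PySem.Str.len p.1) true).find?
      (fun p => PySem.Str.isIn p.1 fl) with
  | none => rfl
  | some p =>
    have hmem : p ∈ d.items :=
      (List.Perm.mem_iff (PySem.List.sorted_perm d.items (fun p => PySem.Str.len p.1) true)).mp
        (List.mem_of_find?_eq_some hf)
    have hget : d.get? p.1 = some p.2 :=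
      PySem.Dict.get?_of_mem_items d (by simpa using hmem) (PySem.Dict.nodup_keys_ofList aps)
    simp [pvEnc, hget]

-- ===== VERDICT (by name: the statement is the Claim_ definition above) =====
theorem extract_team_from_flair_spec : Claim_equal_extract_team_from_flair := by
  intro flair_text alias_to_team _
  unfold Spec_extract_team_from_flair extract_team_from_flair extract_team_from_flair_alt
  cases flair_text with
  | none => rfl
  | some s =>
    by_cases hs : s = ""
    · simp [hs]
    · simp only [hs, if_false]
      exact pv_main (PySem.Str.lower s) alias_to_team
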